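-- pv_equiv track=rewrite | github.com/owings1/pytableaux | test/utils.py | loopgen
-- ===== SOURCE A (Python) =====
-- from typing import Collection, Iterable, Mapping, NamedTuple, Sequence, TypeVar
--
-- _T = TypeVar('_T')
--
-- def loopgen(c: Collection[_T], n: int = None):
--     if not len(c) and (n is None or n > 0):
--         raise TypeError('empty collection')
--     it = iter(c)
--     i = 0
--     while n is None or n > i:
--         try:
--             yield next(it)
--         except StopIteration:
--             it = iter(c)
--             continue
--         if n is not None:
--             i += 1
-- ===== SOURCE B (Python) =====
-- def loopgen(c, n=None):
--     if not len(c) and (n is None or n > 0):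
--         raise TypeError('empty collection')
--     items = list(c)
--     i = 0
--     while n is None or i < n:
--         yield items[i % len(items)]
--         i += 1
-- ===== Notes on version B (the rewrite author's own statement) =====
-- stated objective: idiomatic
-- what changed: B snapshots the collection into a list once and cycles by modular indexing with a single counter, instead of repeatedly recreating iterators and catching StopIteration.
import Mathlib
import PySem

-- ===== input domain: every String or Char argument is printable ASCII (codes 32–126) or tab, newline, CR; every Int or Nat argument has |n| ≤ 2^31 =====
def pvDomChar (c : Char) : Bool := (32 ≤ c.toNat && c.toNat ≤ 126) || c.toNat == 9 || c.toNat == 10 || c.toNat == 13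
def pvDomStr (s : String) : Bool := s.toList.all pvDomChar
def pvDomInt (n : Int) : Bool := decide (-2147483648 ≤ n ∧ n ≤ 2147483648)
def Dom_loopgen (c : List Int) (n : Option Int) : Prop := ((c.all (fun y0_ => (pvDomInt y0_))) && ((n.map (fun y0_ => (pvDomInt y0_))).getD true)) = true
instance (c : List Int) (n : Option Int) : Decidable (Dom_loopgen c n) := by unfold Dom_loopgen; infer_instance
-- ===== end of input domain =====

-- B replaces A's iterator-recreation loop by a snapshot list cycled with modular indexing (idiomatic, same cost).


-- ===== PORT A =====
-- A's while loop: state is the current iterator `it` (suffix of c) and the count of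
-- yields so far (here: the remaining budget k = n - i).  On StopIteration (it = []) the
-- iterator is restarted from c and, when c is nonempty, the next step yields c's head —
-- transcribed here as one step (when c = [] the restart makes no progress, which is only
-- reachable when the budget is 0; excluded otherwise by Pre_).
def loopgenLoop (c : List Int) : Nat → List Int → List Int
  | 0, _ => []
  | Nat.succ k, [] =>
      match c with
      | [] => []
      | h :: t => h :: loopgenLoop c k t
  | Nat.succ k, h :: t => h :: loopgenLoop c k t

-- n = none is an infinite generator (excluded by Pre_); the port returns [] there.
def loopgen (c : List Int) (n : Option Int) : List Int :=
  match n with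
  | none => []
  | some m =>
      if c = [] ∧ m > 0 then []   -- Python raises TypeError here (excluded by Pre_)
      else loopgenLoop c m.toNat c

-- ===== PORT B =====
-- B: snapshot items = list(c); while i < n: yield items[i % len(items)]; i += 1.
def loopgen_alt (c : List Int) (n : Option Int) : List Int :=
  match n with
  | none => []
  | some m =>
      if c = [] ∧ m > 0 then []   -- Python raises TypeError here (excluded by Pre_)
      else (List.range m.toNat).map (fun i => c.getD (i % c.length) 0)

-- ===== PRECONDITION & SPEC =====
-- Pre_ excludes: n = None (both generators are infinite, list() diverges) and
-- c = [] with n > 0 (both A and B raise TypeError('empty collection')).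
def Pre_loopgen (c : List Int) (n : Option Int) : Prop :=
  ∃ m : Int, n = some m ∧ (c ≠ [] ∨ m ≤ 0)
instance (c : List Int) (n : Option Int) : Decidable (Pre_loopgen c n) := by
  unfold Pre_loopgen
  cases n with
  | none => exact isFalse (by simp)
  | some m => exact decidable_of_iff (c ≠ [] ∨ m ≤ 0) (by simp)

def pvWitness_loopgen : List Int × Option Int := ([1, 2, 3], some 7)

def Spec_loopgen (c : List Int) (n : Option Int) (out : List Int) : Prop := out = loopgen_alt c n
instance (c : List Int) (n : Option Int) (out : List Int) : Decidable (Spec_loopgen c n out) := by unfold Spec_loopgen; infer_instance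

-- ===== CLAIM (what is proved, stated in full; the proofs are below) =====
def Claim_equal_loopgen : Prop := ∀ (c : List Int) (n : Option Int), Dom_loopgen c n → Pre_loopgen c n → Spec_loopgen c n (loopgen c n)

-- ===== LEMMAS AND PROOFS =====

-- Loop invariant: starting from the suffix c.drop j, A's loop with budget k yields the
-- elements at indices (j + i) % c.length for i < k.
theorem loopgenLoop_drop (c : List Int) (hc : c ≠ []) :
    ∀ (k j : Nat), j ≤ c.length →
      loopgenLoop c k (c.drop j) =
        (List.range k).map (fun i => c.getD ((j + i) % c.length) 0) := by
  intro k
  induction k with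
  | zero => intro j _; simp [loopgenLoop]
  | succ k ih =>
    intro j hj
    have hlen : 0 < c.length := List.length_pos_iff.mpr hc
    rcases Nat.lt_or_ge j c.length with hlt | hge
    · -- iterator nonempty: drop j = c[j] :: drop (j+1)
      rw [List.drop_eq_getElem_cons hlt]
      simp only [loopgenLoop]
      rw [ih (j + 1) hlt, List.range_succ_eq_map]
      simp only [List.map_cons, List.map_map]
      congr 1
      · rw [Nat.add_zero, Nat.mod_eq_of_lt hlt]
        simp [hlt]
      · apply List.map_congr_left
        intro i _
        simp only [Function.comp]
        congr 2
        omega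
    · -- iterator exhausted: j = length, restart from c
      have hj' : j = c.length := le_antisymm hj hge
      have hdrop : c.drop j = [] := by rw [hj']; simp
      rw [hdrop]
      obtain ⟨h, t, rfl⟩ := List.exists_cons_of_ne_nil hc
      show h :: loopgenLoop (h :: t) k t = _
      have h1 : loopgenLoop (h :: t) k t =
          (List.range k).map (fun i => (h :: t).getD ((1 + i) % (h :: t).length) 0) := by
        simpa using ih 1 (by simp)
      rw [h1, List.range_succ_eq_map]
      simp only [List.map_cons, List.map_map]
      congr 1
      · rw [Nat.add_zero, hj', Nat.mod_self]
        simp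
      · apply List.map_congr_left
        intro i _
        simp only [Function.comp]
        rw [hj', Nat.add_mod_left, Nat.succ_eq_add_one, Nat.add_comm 1 i]

-- ===== VERDICT (by name: the statement is the Claim_ definition above) =====
theorem loopgen_spec : Claim_equal_loopgen := by
  intro c n _ hpre
  obtain ⟨m, rfl, hcm⟩ := hpre
  unfold Spec_loopgen loopgen loopgen_alt
  by_cases hc : c = []
  · -- then m ≤ 0, so the loop body never runs on either side
    have hm : m ≤ 0 := by tauto
    have hmn : m.toNat = 0 := Int.toNat_of_nonpos hm
    simp [hc, hmn, loopgenLoop, Int.not_lt.mpr hm]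
  · simp only [hc, false_and, if_false]
    have := loopgenLoop_drop c hc m.toNat 0 (Nat.zero_le _)
    simpa using this
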